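-- pv_equiv track=rewrite | github.com/vamshikmohan/Skylark_Assignment_Vamshik_M | query_Funcs.py | is_business_query
-- ===== SOURCE A (Python) =====
-- def is_business_query(query):
--
--     business_terms = [
--         "deal",
--         "pipeline",
--         "sector",
--         "revenue",
--         "billing",
--         "client",
--         "project",
--         "value",
--         "workorder"
--     ]
--
--     q = query.lower()
--
--     return any(term in q for term in business_terms)
-- ===== SOURCE B (Python) =====
-- _BUSINESS_TERMS = (
--     "deal", "pipeline", "sector", "revenue", "billing",
--     "client", "project", "value", "workorder",
-- )
--
--
-- def is_business_query(query):
--     # Single left-to-right scan of the lowered query: at each position,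
--     # test whether any business term starts there.
--     q = query.lower()
--     for i in range(len(q)):
--         if any(q.startswith(t, i) for t in _BUSINESS_TERMS):
--             return True
--     return False
-- ===== Notes on version B (the rewrite author's own statement) =====
-- stated objective: alternative
-- what changed: B replaces nine independent 'term in q' substring searches with one position-driven left-to-right scan of the lowered query, testing at each index whether any term starts there.
import Mathlib
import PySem

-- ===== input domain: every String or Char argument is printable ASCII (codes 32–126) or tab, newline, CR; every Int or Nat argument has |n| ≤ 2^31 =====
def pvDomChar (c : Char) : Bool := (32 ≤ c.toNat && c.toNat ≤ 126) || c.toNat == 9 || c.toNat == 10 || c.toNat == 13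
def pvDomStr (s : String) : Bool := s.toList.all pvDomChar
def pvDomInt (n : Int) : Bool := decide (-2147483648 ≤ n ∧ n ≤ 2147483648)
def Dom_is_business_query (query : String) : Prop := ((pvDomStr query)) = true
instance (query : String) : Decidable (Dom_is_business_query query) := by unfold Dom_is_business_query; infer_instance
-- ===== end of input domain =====

-- ===== PORT A =====
-- A: lowercase the query and test each of the nine business terms with `term in q`.
def is_business_query (query : String) : Bool :=
  let business_terms : List String :=
    ["deal", "pipeline", "sector", "revenue", "billing",
     "client", "project", "value", "workorder"]
  let q := PySem.Str.lower query
  business_terms.any (fun term => PySem.Str.isIn term q)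

-- ===== PORT B =====
-- B: one left-to-right scan; at each index test whether any term starts there
-- (q.startswith(t, i) with 0 ≤ i < len(q) is exactly `t <+: q.drop i`).
def pvBusinessTerms : List String :=
  ["deal", "pipeline", "sector", "revenue", "billing",
   "client", "project", "value", "workorder"]

def is_business_query_alt (query : String) : Bool :=
  let q := (PySem.Str.lower query).toList
  (List.range q.length).any (fun i =>
    pvBusinessTerms.any (fun t => PySem.Chars.startswith (q.drop i) t.toList))

-- ===== PRECONDITION & SPEC =====
def Spec_is_business_query (query : String) (out : Bool) : Prop := out = is_business_query_alt query
instance (query : String) (out : Bool) : Decidable (Spec_is_business_query query out) := by unfold Spec_is_business_query; infer_instance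

-- ===== CLAIM (what is proved, stated in full; the proofs are below) =====
def Claim_equal_is_business_query : Prop := ∀ (query : String), Dom_is_business_query query → Spec_is_business_query query (is_business_query query)

-- ===== LEMMAS AND PROOFS =====

-- For a nonempty pattern, `sub in s` holds iff sub is a prefix of some drop at an index < length.
theorem pv_isIn_eq_range_any (t s : List Char) (ht : t ≠ []) :
    PySem.Chars.isIn t s =
      (List.range s.length).any (fun i => PySem.Chars.startswith (s.drop i) t) := by
  rw [Bool.eq_iff_iff]
  simp only [List.any_eq_true, List.mem_range, PySem.Chars.startswith_iff]
  rw [← PySem.Chars.exists_prefix_drop_iff_isIn]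
  constructor
  · rintro ⟨j, hj⟩
    by_cases h : j < s.length
    · exact ⟨j, h, hj⟩
    · exfalso
      rw [List.drop_eq_nil_of_le (le_of_not_gt h)] at hj
      exact ht (List.prefix_nil.mp hj)
  · rintro ⟨i, _, hi⟩
    exact ⟨i, hi⟩

-- ===== VERDICT (by name: the statement is the Claim_ definition above) =====
theorem is_business_query_spec : Claim_equal_is_business_query := by
  intro query _
  unfold Spec_is_business_query is_business_query is_business_query_alt
  simp only [PySem.Str.isIn_eq]
  set q := (PySem.Str.lower query).toList with hq
  have hterms : ∀ t ∈ pvBusinessTerms, t.toList ≠ [] := by decide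
  rw [Bool.eq_iff_iff]
  simp only [List.any_eq_true]
  constructor
  · rintro ⟨t, htmem, hin⟩
    rw [show ([("deal" : String), "pipeline", "sector", "revenue", "billing",
        "client", "project", "value", "workorder"]) = pvBusinessTerms from rfl] at htmem
    rw [pv_isIn_eq_range_any _ _ (hterms t htmem)] at hin
    obtain ⟨i, himem, hsw⟩ := List.any_eq_true.mp hin
    exact ⟨i, himem, t, htmem, hsw⟩
  · rintro ⟨i, himem, t, htmem, hsw⟩
    refine ⟨t, htmem, ?_⟩
    rw [pv_isIn_eq_range_any _ _ (hterms t htmem)]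
    exact List.any_eq_true.mpr ⟨i, himem, hsw⟩
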